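-- pv_equiv track=rewrite | github.com/vmit2005/python_P1 | P8DZ.py | new_matrix_123
-- ===== SOURCE A (Python) =====
-- def new_matrix_123(row, col):
--     c, mm = 1, []
--     for j in range(row):
--         d = []
--         for i in range(col):
--             d.append(c)
--             c += 1
--         mm.append(d)
--     return (mm)
-- ===== SOURCE B (Python) =====
-- def new_matrix_123(row, col):
--     n = row if row > 0 else 0
--     m = col if col > 0 else 0
--     flat = list(range(1, n * m + 1))
--     return [flat[k * m:(k + 1) * m] for k in range(n)]
-- ===== Notes on version B (the rewrite author's own statement) =====
-- stated objective: alternative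
-- what changed: B first materialises the whole sequence 1..row*col as one flat list in a single pass and then chunks it into rows by slicing, instead of A's two nested loops threading a mutable counter cell by cell.
import Mathlib
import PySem

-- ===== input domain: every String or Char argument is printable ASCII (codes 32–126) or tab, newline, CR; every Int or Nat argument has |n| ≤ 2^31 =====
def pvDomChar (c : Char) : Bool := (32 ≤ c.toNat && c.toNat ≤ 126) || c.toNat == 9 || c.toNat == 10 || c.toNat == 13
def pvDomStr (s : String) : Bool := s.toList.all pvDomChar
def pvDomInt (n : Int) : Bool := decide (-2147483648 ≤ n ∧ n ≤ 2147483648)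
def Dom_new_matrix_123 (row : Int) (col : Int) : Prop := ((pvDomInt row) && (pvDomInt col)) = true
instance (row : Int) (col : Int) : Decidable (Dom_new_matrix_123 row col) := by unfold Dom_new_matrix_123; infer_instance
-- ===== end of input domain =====

-- B builds the whole flat sequence 1..row*col once and then cuts it into rows by slicing,
-- instead of A's nested loops threading a mutable counter; objective: alternative.

-- ===== PORT A =====
-- literal port of A: counter c threaded through nested loops, rows/elements appended one at a time
def new_matrix_123 (row : Int) (col : Int) : List (List Int) :=
  let init : Int × List (List Int) := (1, [])
  let fin := (PySem.List.pyRange 0 row).foldl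
    (fun (st : Int × List (List Int)) _j =>
      let inner := (PySem.List.pyRange 0 col).foldl
        (fun (p : Int × List Int) _i => (p.1 + 1, p.2 ++ [p.1])) (st.1, [])
      (inner.1, st.2 ++ [inner.2])) init
  fin.2

-- ===== PORT B =====
-- literal port of B: materialise the flat list range(1, n*m+1), then chunk it with slices
def new_matrix_123_alt (row : Int) (col : Int) : List (List Int) :=
  let n : Int := if row > 0 then row else 0
  let m : Int := if col > 0 then col else 0
  let flat := PySem.List.pyRange 1 (n * m + 1)
  (PySem.List.pyRange 0 n).map
    (fun k => PySem.List.slice flat (some (k * m)) (some ((k + 1) * m)))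

-- ===== PRECONDITION & SPEC =====
def Spec_new_matrix_123 (row : Int) (col : Int) (out : List (List Int)) : Prop := out = new_matrix_123_alt row col
instance (row : Int) (col : Int) (out : List (List Int)) : Decidable (Spec_new_matrix_123 row col out) := by unfold Spec_new_matrix_123; infer_instance

-- ===== CLAIM (what is proved, stated in full; the proofs are below) =====
def Claim_equal_new_matrix_123 : Prop := ∀ (row : Int) (col : Int), Dom_new_matrix_123 row col → Spec_new_matrix_123 row col (new_matrix_123 row col)

-- ===== LEMMAS AND PROOFS =====

-- common middle form: each element written from its coordinates
def pvMid (row col : Int) : List (List Int) :=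
  (PySem.List.pyRange 0 row).map
    (fun j => (PySem.List.pyRange 0 col).map (fun i => j * col + i + 1))

-- the inner loop: starting at counter c it appends c, c+1, … and advances the counter by the list length
theorem pv_inner_fold (l : List Int) (c : Int) (acc : List Int) :
    l.foldl (fun (p : Int × List Int) _i => (p.1 + 1, p.2 ++ [p.1])) (c, acc)
      = (c + l.length, acc ++ (List.range l.length).map (fun i : Nat => c + (i : Int))) := by
  induction l generalizing c acc with
  | nil => simp
  | cons x xs ih =>
      rw [List.foldl_cons, ih, List.length_cons, List.range_succ_eq_map]
      refine Prod.ext (by push_cast; ring) ?_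
      simp only [List.map_cons, List.map_map, Function.comp_def, List.append_assoc,
        List.singleton_append, Nat.cast_zero, add_zero]
      refine congrArg _ (congrArg _ ?_)
      apply List.map_congr_left; intro a _; push_cast; ring

-- the outer loop: the counter advances by L per row (L = inner-range length)
theorem pv_outer_fold (col : Int) (l : List Int) (c : Int) (mm : List (List Int)) :
    l.foldl
      (fun (st : Int × List (List Int)) _j =>
        let inner := (PySem.List.pyRange 0 col).foldl
          (fun (p : Int × List Int) _i => (p.1 + 1, p.2 ++ [p.1])) (st.1, [])
        (inner.1, st.2 ++ [inner.2])) (c, mm)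
      = (c + l.length * (PySem.List.pyRange 0 col).length,
         mm ++ (List.range l.length).map
           (fun j : Nat => (List.range (PySem.List.pyRange 0 col).length).map
              (fun i : Nat => c + (j : Int) * (PySem.List.pyRange 0 col).length + (i : Int)))) := by
  induction l generalizing c mm with
  | nil => simp
  | cons x xs ih =>
      rw [List.foldl_cons, ih, List.length_cons, List.range_succ_eq_map]
      simp only [pv_inner_fold]
      refine Prod.ext (by push_cast; ring) ?_
      simp only [List.map_cons, List.map_map, Function.comp_def, List.append_assoc,
        List.singleton_append, Nat.cast_zero, zero_mul, add_zero, List.nil_append]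
      refine congrArg _ (congrArg _ ?_)
      apply List.map_congr_left; intro a _
      apply List.map_congr_left; intro b _
      push_cast; ring

theorem pv_range_neg (n : Int) (h : n < 0) : PySem.List.pyRange 0 n = [] := by
  simp [PySem.List.pyRange]; omega

-- A equals the middle form
theorem pv_a_eq_mid (row col : Int) : new_matrix_123 row col = pvMid row col := by
  unfold new_matrix_123 pvMid
  simp only [pv_outer_fold, List.nil_append]
  rcases le_or_gt 0 row with hr | hr
  · obtain ⟨r, rfl⟩ := Int.eq_ofNat_of_zero_le hr
    rw [PySem.List.pyRange_zero_natCast]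
    rcases le_or_gt 0 col with hc | hc
    · obtain ⟨cn, rfl⟩ := Int.eq_ofNat_of_zero_le hc
      rw [PySem.List.pyRange_zero_natCast]
      simp only [List.length_map, List.length_range, List.map_map, Function.comp_def]
      apply List.map_congr_left; intro j _
      apply List.map_congr_left; intro i _
      ring
    · rw [pv_range_neg col hc]
      simp only [List.length_nil, List.range_zero, List.map_nil, List.length_map]
      rw [List.map_const', List.map_const']
      simp
  · rw [pv_range_neg row hr]
    simp

-- the k-th slice of the flat list 1..n*m is exactly the k-th row
theorem pv_slice_chunk (n m k : Int) (hm : 0 ≤ m) (hk : 0 ≤ k) (hkn : k < n) :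
    PySem.List.slice (PySem.List.pyRange 1 (n * m + 1)) (some (k * m)) (some ((k + 1) * m))
      = (PySem.List.pyRange 0 m).map (fun i => k * m + i + 1) := by
  have ha : 0 ≤ k * m := mul_nonneg hk hm
  have hab : k * m ≤ (k + 1) * m := by nlinarith
  have hbN : (k + 1) * m ≤ n * m := by
    have : k + 1 ≤ n := by omega
    exact mul_le_mul_of_nonneg_right this hm
  rw [PySem.List.pyRange_one_append 1 (k * m + 1) (n * m + 1) (by omega) (by omega),
      PySem.List.pyRange_one_append (k * m + 1) ((k + 1) * m + 1) (n * m + 1) (by omega) (by omega),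
      PySem.List.slice_toNat _ ha (by omega)]
  have hlen1 : (PySem.List.pyRange 1 (k * m + 1)).length = (k * m).toNat := by
    rw [PySem.List.length_pyRange_one]; omega
  rw [← List.append_assoc, List.append_assoc, ← hlen1, List.drop_left, hlen1]
  have hlen2 : (PySem.List.pyRange (k * m + 1) ((k + 1) * m + 1)).length
      = ((k + 1) * m).toNat - (k * m).toNat := by
    rw [PySem.List.length_pyRange_one]; omega
  rw [List.take_left' hlen2]
  rw [PySem.List.pyRange_one, PySem.List.pyRange_one]
  have : ((k + 1) * m + 1 - (k * m + 1)).toNat = (m - 0).toNat := by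
    have : (k + 1) * m + 1 - (k * m + 1) = m := by ring
    omega
  rw [this, List.map_map]
  apply List.map_congr_left; intro t _
  simp only [Function.comp_apply]; ring

-- B equals the middle form
theorem pv_b_eq_mid (row col : Int) : new_matrix_123_alt row col = pvMid row col := by
  unfold new_matrix_123_alt pvMid
  have hn : PySem.List.pyRange 0 (if row > 0 then row else 0) = PySem.List.pyRange 0 row := by
    split
    · rfl
    · rw [PySem.List.pyRange_one_eq_nil (by omega), PySem.List.pyRange_one_eq_nil (by omega)]
  simp only [hn]
  apply List.map_congr_left; intro k hk
  rw [PySem.List.mem_pyRange_one] at hk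
  have hkn : k < if row > 0 then row else 0 := by split <;> omega
  rw [pv_slice_chunk _ _ k (by split <;> omega) hk.1 hkn]
  split
  · rfl
  · rename_i hc
    rw [PySem.List.pyRange_one_eq_nil (le_refl 0), PySem.List.pyRange_one_eq_nil (by omega)]
    simp

-- ===== VERDICT (by name: the statement is the Claim_ definition above) =====
theorem new_matrix_123_spec : Claim_equal_new_matrix_123 := by
  intro row col _
  show new_matrix_123 row col = new_matrix_123_alt row col
  rw [pv_a_eq_mid, pv_b_eq_mid]
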